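-- pv_equiv track=rewrite | github.com/ninotica/trabalho_a2_md | coloracao.py | calendario_from_coloracao
-- ===== SOURCE A (Python) =====
-- def calendario_from_coloracao(coloracao: dict) -> dict:
--     calendario = {}
--     for disciplina in coloracao:
--         if coloracao[disciplina] not in calendario:
--             calendario[coloracao[disciplina]] = {disciplina}
--         else:
--             calendario[coloracao[disciplina]].add(disciplina)
--     return calendario
-- ===== SOURCE B (Python) =====
-- def calendario_from_coloracao(coloracao: dict) -> dict:
--     return {c: {d for d in coloracao if coloracao[d] == c}
--             for c in dict.fromkeys(coloracao.values())}
-- ===== Notes on version B (the rewrite author's own statement) =====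
-- stated objective: alternative
-- what changed: Replaces A's single-pass hash-bucketing loop with a two-phase build: first the distinct colors in first-occurrence order (dict.fromkeys of the values), then one filtering scan over all disciplines per color.
import Mathlib
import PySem

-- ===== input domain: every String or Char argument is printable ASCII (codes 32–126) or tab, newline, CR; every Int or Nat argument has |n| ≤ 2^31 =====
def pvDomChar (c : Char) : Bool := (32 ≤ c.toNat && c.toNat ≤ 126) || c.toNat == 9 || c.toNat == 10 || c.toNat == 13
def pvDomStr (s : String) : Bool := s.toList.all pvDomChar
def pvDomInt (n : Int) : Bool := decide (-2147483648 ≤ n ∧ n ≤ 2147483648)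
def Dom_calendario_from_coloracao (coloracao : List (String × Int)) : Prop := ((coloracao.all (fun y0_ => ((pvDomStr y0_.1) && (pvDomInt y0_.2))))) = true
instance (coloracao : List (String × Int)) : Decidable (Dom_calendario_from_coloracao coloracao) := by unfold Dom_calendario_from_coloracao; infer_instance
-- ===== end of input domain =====

-- B rebuilds the calendar in two phases (distinct colors first, then one filtering scan per color)
-- instead of A's single-pass hash-bucketing loop; alternative decomposition, same results.


-- ===== PORT A =====
-- dict iteration 'for disciplina in coloracao' with lookup 'coloracao[disciplina]' is ported as a
-- fold over the (key, value) pairs in insertion order (exact for a dict, whose keys are distinct).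
def calendario_from_coloracao (coloracao : List (String × Int)) : List (Int × List String) :=
  (coloracao.foldl
    (fun (calendario : PySem.Dict Int (PySem.Set String)) p =>
      if calendario.contains p.2 = false then
        calendario.insert p.2 (PySem.Set.add PySem.Set.empty p.1)
      else
        calendario.modify p.2 PySem.Set.empty (fun s => PySem.Set.add s p.1))
    PySem.Dict.empty).items

-- ===== PORT B =====
-- {c: {d for d in coloracao if coloracao[d] == c} for c in dict.fromkeys(coloracao.values())};
-- the lookup 'coloracao[d] == c' is ported as the pair's own value (exact for a dict).
def calendario_from_coloracao_alt (coloracao : List (String × Int)) : List (Int × List String) :=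
  (PySem.List.dedup (coloracao.map Prod.snd)).map
    (fun c => (c, PySem.Set.ofList ((coloracao.filter (fun p => p.2 == c)).map Prod.fst)))

-- ===== PRECONDITION & SPEC =====
def Spec_calendario_from_coloracao (coloracao : List (String × Int)) (out : List (Int × List String)) : Prop := out = calendario_from_coloracao_alt coloracao
instance (coloracao : List (String × Int)) (out : List (Int × List String)) : Decidable (Spec_calendario_from_coloracao coloracao out) := by unfold Spec_calendario_from_coloracao; infer_instance

-- ===== CLAIM (what is proved, stated in full; the proofs are below) =====
def Claim_equal_calendario_from_coloracao : Prop := ∀ (coloracao : List (String × Int)), Dom_calendario_from_coloracao coloracao → Spec_calendario_from_coloracao coloracao (calendario_from_coloracao coloracao)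

-- ===== LEMMAS AND PROOFS =====

-- the bucket B assigns to a color
def pvBucket (l : List (String × Int)) (c : Int) : PySem.Set String :=
  PySem.Set.ofList ((l.filter (fun p => p.2 == c)).map Prod.fst)

-- A's loop body, named for the proofs
def pvStep (calendario : PySem.Dict Int (PySem.Set String)) (p : String × Int) :
    PySem.Dict Int (PySem.Set String) :=
  if calendario.contains p.2 = false then
    calendario.insert p.2 (PySem.Set.add PySem.Set.empty p.1)
  else
    calendario.modify p.2 PySem.Set.empty (fun s => PySem.Set.add s p.1)

lemma pvAlt_eq (l : List (String × Int)) :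
    calendario_from_coloracao_alt l =
      (PySem.Set.ofList (l.map Prod.snd)).map (fun c => (c, pvBucket l c)) := rfl

lemma pvBucket_append_ne (l : List (String × Int)) (p : String × Int) (c : Int)
    (h : ¬ p.2 = c) : pvBucket (l ++ [p]) c = pvBucket l c := by
  simp [pvBucket, List.filter_append, h]

lemma pvBucket_append_self (l : List (String × Int)) (p : String × Int) :
    pvBucket (l ++ [p]) p.2 = PySem.Set.add (pvBucket l p.2) p.1 := by
  simp [pvBucket, List.filter_append, PySem.Set.ofList_eq_foldl, List.foldl_append]

lemma pvBucket_empty_of_not_mem (l : List (String × Int)) (c : Int)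
    (h : c ∉ l.map Prod.snd) : pvBucket l c = [] := by
  have : l.filter (fun p => p.2 == c) = [] := by
    rw [List.filter_eq_nil_iff]
    intro q hq hbeq
    exact h (List.mem_map.mpr ⟨q, hq, by simpa using hbeq⟩)
  simp [pvBucket, this, PySem.Set.ofList]

lemma pvOfList_append_singleton {a : Type} [BEq a] (xs : List a) (x : a) :
    PySem.Set.ofList (xs ++ [x]) = PySem.Set.add (PySem.Set.ofList xs) x := by
  rw [PySem.Set.ofList_eq_foldl, PySem.Set.ofList_eq_foldl, List.foldl_append]
  rfl

lemma pvStep_items (l : List (String × Int)) (p : String × Int) :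
    (pvStep ⟨calendario_from_coloracao_alt l⟩ p).items =
      calendario_from_coloracao_alt (l ++ [p]) := by
  have hkeys : (⟨calendario_from_coloracao_alt l⟩ : PySem.Dict Int (PySem.Set String)).keys
      = PySem.Set.ofList (l.map Prod.snd) := by
    simp [PySem.Dict.keys, pvAlt_eq, List.map_map, Function.comp_def]
  have hcont : (⟨calendario_from_coloracao_alt l⟩ : PySem.Dict Int (PySem.Set String)).contains p.2
      = decide (p.2 ∈ l.map Prod.snd) := by
    rw [PySem.Dict.contains_eq_decide_mem_keys, hkeys]
    simp [PySem.Set.mem_ofList]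
  have hmsnd : (l ++ [p]).map Prod.snd = l.map Prod.snd ++ [p.2] := by simp
  by_cases hp : p.2 ∈ l.map Prod.snd
  · -- color already present: A modifies the existing bucket, B filters it again
    have hcont' : (⟨calendario_from_coloracao_alt l⟩ : PySem.Dict Int (PySem.Set String)).contains p.2 = true := by
      rw [hcont]; simpa using hp
    have hmem : (p.2, pvBucket l p.2) ∈ calendario_from_coloracao_alt l := by
      rw [pvAlt_eq]
      exact List.mem_map.mpr ⟨p.2, (PySem.Set.mem_ofList _ _).mpr hp, rfl⟩
    have hnd : (⟨calendario_from_coloracao_alt l⟩ : PySem.Dict Int (PySem.Set String)).keys.Nodup := by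
      rw [hkeys]; exact PySem.Set.nodup_ofList _
    have hgetD : (⟨calendario_from_coloracao_alt l⟩ : PySem.Dict Int (PySem.Set String)).getD p.2 PySem.Set.empty
        = pvBucket l p.2 := PySem.Dict.getD_of_mem_items _ hmem hnd _
    have hadd : PySem.Set.add (PySem.Set.ofList (l.map Prod.snd)) p.2
        = PySem.Set.ofList (l.map Prod.snd) := by
      have hin : p.2 ∈ PySem.Set.ofList (l.map Prod.snd) := (PySem.Set.mem_ofList _ _).mpr hp
      have hC : PySem.Set.contains (PySem.Set.ofList (l.map Prod.snd)) p.2 = true := by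
        simpa [PySem.Set.contains] using hin
      simp only [PySem.Set.add, hC, if_pos]
    rw [pvStep, if_neg (by simp [hcont']), PySem.Dict.modify, hgetD]
    rw [PySem.Dict.items_insert_of_contains _ _ hcont']
    show List.map _ (calendario_from_coloracao_alt l) = _
    rw [pvAlt_eq, pvAlt_eq, List.map_map, hmsnd, pvOfList_append_singleton, hadd]
    apply List.map_congr_left
    intro c hc
    by_cases hcp : c = p.2
    · subst hcp
      simp [Function.comp, pvBucket_append_self l p]
    · simp [Function.comp, (by simpa using hcp : (c == p.2) = false),
        pvBucket_append_ne l p c (fun h => hcp h.symm)]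
  · -- fresh color: A appends a new singleton bucket, B appends the color at the end
    have hcont' : (⟨calendario_from_coloracao_alt l⟩ : PySem.Dict Int (PySem.Set String)).contains p.2 = false := by
      rw [hcont]; simpa using hp
    have hadd : PySem.Set.add (PySem.Set.ofList (l.map Prod.snd)) p.2
        = PySem.Set.ofList (l.map Prod.snd) ++ [p.2] := by
      have hnotin : p.2 ∉ PySem.Set.ofList (l.map Prod.snd) :=
        fun h => hp ((PySem.Set.mem_ofList _ _).mp h)
      have hC : PySem.Set.contains (PySem.Set.ofList (l.map Prod.snd)) p.2 = false := by
        simpa [PySem.Set.contains] using hnotin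
      simp only [PySem.Set.add, hC, Bool.false_eq_true, if_false]
    rw [pvStep, if_pos hcont', PySem.Dict.items_insert_of_not_contains _ _ hcont']
    show calendario_from_coloracao_alt l ++ _ = _
    rw [pvAlt_eq, pvAlt_eq, hmsnd, pvOfList_append_singleton, hadd, List.map_append]
    congr 1
    · apply List.map_congr_left
      intro c hc
      have hcp : ¬ p.2 = c := fun h => hp (by rw [h]; exact (PySem.Set.mem_ofList _ _).mp hc)
      rw [pvBucket_append_ne l p c hcp]
    · rw [List.map_cons, List.map_nil, pvBucket_append_self l p,
        pvBucket_empty_of_not_mem l p.2 hp]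
      rfl

lemma pvFoldl_items (l : List (String × Int)) :
    (l.foldl pvStep PySem.Dict.empty).items = calendario_from_coloracao_alt l := by
  induction l using List.reverseRecOn with
  | nil => rfl
  | append_singleton l p ih =>
    rw [List.foldl_append, List.foldl_cons, List.foldl_nil,
      PySem.Dict.ext ih (y := ⟨calendario_from_coloracao_alt l⟩)]
    exact pvStep_items l p

-- ===== VERDICT (by name: the statement is the Claim_ definition above) =====
theorem calendario_from_coloracao_spec : Claim_equal_calendario_from_coloracao := by
  intro coloracao _
  show calendario_from_coloracao coloracao = calendario_from_coloracao_alt coloracao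
  rw [calendario_from_coloracao, ← pvFoldl_items coloracao]
  rfl
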